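-- pv_equiv track=rewrite | github.com/baller70/BasketballAnalysisAssessmentApp | scripts/download_training_images.py | classify_image_phase
-- ===== SOURCE A (Python) =====
-- def classify_image_phase(url: str) -> str:
--     """
--     Attempt to classify image phase based on URL/filename.
--     Returns 'unclassified' if can't determine.
--     """
--     url_lower = url.lower()
--
--     if any(x in url_lower for x in ["free_throw", "freethrow", "setup", "prepare"]):
--         return "load"
--     elif any(x in url_lower for x in ["aim", "target", "set_point"]):
--         return "set"
--     elif any(x in url_lower for x in ["release", "shoot", "shot"]):
--         return "release"
--     elif any(x in url_lower for x in ["follow", "finish", "complete"]):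
--         return "follow_through"
--
--     return "unclassified"
-- ===== SOURCE B (Python) =====
-- _KEYWORDS = (
--     ("free_throw", 0), ("freethrow", 0), ("setup", 0), ("prepare", 0),
--     ("aim", 1), ("target", 1), ("set_point", 1),
--     ("release", 2), ("shoot", 2), ("shot", 2),
--     ("follow", 3), ("finish", 3), ("complete", 3),
-- )
-- _LABELS = ("load", "set", "release", "follow_through")
--
--
-- def classify_image_phase(url: str) -> str:
--     # Single left-to-right scan over the lowercased text: at each position,
--     # record the best (lowest) priority rank of any keyword starting there.
--     u = url.lower()
--     best = 4
--     for i in range(len(u)):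
--         for kw, rank in _KEYWORDS:
--             if kw == u[i:i + len(kw)] and rank < best:
--                 best = rank
--     return _LABELS[best] if best < 4 else "unclassified"
-- ===== Notes on version B (the rewrite author's own statement) =====
-- stated objective: alternative
-- what changed: Instead of four independent substring searches tried branch by branch, B makes a single left-to-right scan over the lowercased string, at each position min-accumulating the priority rank of any keyword starting there, and maps the final best rank to its label.
import Mathlib
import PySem

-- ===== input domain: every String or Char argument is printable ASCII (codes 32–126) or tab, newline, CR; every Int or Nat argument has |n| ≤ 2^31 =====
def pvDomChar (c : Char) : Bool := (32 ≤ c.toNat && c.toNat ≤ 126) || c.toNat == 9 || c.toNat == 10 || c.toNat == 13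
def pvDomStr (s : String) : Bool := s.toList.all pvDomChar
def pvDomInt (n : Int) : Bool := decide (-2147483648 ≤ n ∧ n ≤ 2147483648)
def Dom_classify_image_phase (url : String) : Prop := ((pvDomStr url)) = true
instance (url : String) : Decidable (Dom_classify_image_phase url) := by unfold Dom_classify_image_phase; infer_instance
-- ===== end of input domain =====

-- B replaces the four branch-by-branch substring searches by one positional scan
-- that min-accumulates the priority rank of keywords starting at each position (alternative algorithm, same cost).

-- ===== PORT A =====
def classify_image_phase (url : String) : String :=
  let url_lower := PySem.Str.lower url
  if ["free_throw", "freethrow", "setup", "prepare"].any (fun x => PySem.Str.isIn x url_lower) then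
    "load"
  else if ["aim", "target", "set_point"].any (fun x => PySem.Str.isIn x url_lower) then
    "set"
  else if ["release", "shoot", "shot"].any (fun x => PySem.Str.isIn x url_lower) then
    "release"
  else if ["follow", "finish", "complete"].any (fun x => PySem.Str.isIn x url_lower) then
    "follow_through"
  else
    "unclassified"

-- ===== PORT B =====
def pvKeywords : List (List Char × Nat) :=
  [ ("free_throw".toList, 0), ("freethrow".toList, 0), ("setup".toList, 0), ("prepare".toList, 0),
    ("aim".toList, 1), ("target".toList, 1), ("set_point".toList, 1),
    ("release".toList, 2), ("shoot".toList, 2), ("shot".toList, 2),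
    ("follow".toList, 3), ("finish".toList, 3), ("complete".toList, 3) ]

def pvLabels : List String := ["load", "set", "release", "follow_through"]

-- inner loop body: `if kw == u[i:i+len(kw)] and rank < best: best = rank`
def pvInner (u : List Char) (i : Nat) (best : Nat) : Nat :=
  pvKeywords.foldl
    (fun b p => if (p.1 = (u.drop i).take p.1.length) ∧ p.2 < b then p.2 else b) best

def classify_image_phase_alt (url : String) : String :=
  let u := (PySem.Str.lower url).toList
  let best := (List.range u.length).foldl (fun b i => pvInner u i b) 4
  if best < 4 then pvLabels.getD best "unclassified" else "unclassified"

-- ===== PRECONDITION & SPEC =====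
def Spec_classify_image_phase (url : String) (out : String) : Prop := out = classify_image_phase_alt url
instance (url : String) (out : String) : Decidable (Spec_classify_image_phase url out) := by unfold Spec_classify_image_phase; infer_instance

-- ===== CLAIM =====
def Claim_equal_classify_image_phase : Prop := ∀ (url : String), Dom_classify_image_phase url → Spec_classify_image_phase url (classify_image_phase url)

-- ===== LEMMAS AND PROOFS =====

-- characterisation of the inner fold: result ≤ j iff the accumulator already was, or some matching keyword has rank ≤ j
theorem pvInner_le_iff (u : List Char) (i : Nat) (best j : Nat) :
    pvInner u i best ≤ j ↔ best ≤ j ∨ ∃ p ∈ pvKeywords, p.1 = (u.drop i).take p.1.length ∧ p.2 ≤ j := by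
  unfold pvInner
  generalize pvKeywords = l
  induction l generalizing best with
  | nil => simp
  | cons q t ih =>
      simp only [List.foldl_cons, List.mem_cons]
      constructor
      · intro h
        rcases (ih _).mp h with h' | ⟨p, hp, hm, hr⟩
        · split_ifs at h' with hc
          · exact Or.inr ⟨q, Or.inl rfl, hc.1, h'⟩
          · exact Or.inl h'
        · exact Or.inr ⟨p, Or.inr hp, hm, hr⟩
      · intro h
        apply (ih _).mpr
        rcases h with h' | ⟨p, hp, hm, hr⟩
        · left; split_ifs with hc
          · exact le_trans (le_of_lt hc.2) h'
          · exact h'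
        · rcases hp with rfl | hp
          · left; split_ifs with hc
            · exact hr
            · rcases (not_and_or.mp hc) with hc' | hc'
              · exact absurd hm hc'
              · omega
          · exact Or.inr ⟨p, hp, hm, hr⟩

-- characterisation of the outer fold
theorem pvScan_le_iff (u : List Char) (best j : Nat) :
    (List.range u.length).foldl (fun b i => pvInner u i b) best ≤ j ↔
      best ≤ j ∨ ∃ i < u.length, ∃ p ∈ pvKeywords, p.1 = (u.drop i).take p.1.length ∧ p.2 ≤ j := by
  rw [show (∃ i < u.length, ∃ p ∈ pvKeywords, p.1 = (u.drop i).take p.1.length ∧ p.2 ≤ j) ↔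
        (∃ i ∈ List.range u.length, ∃ p ∈ pvKeywords, p.1 = (u.drop i).take p.1.length ∧ p.2 ≤ j) by
      simp [List.mem_range]]
  generalize List.range u.length = l
  induction l generalizing best with
  | nil => simp
  | cons i t ih =>
      simp only [List.foldl_cons, List.mem_cons]
      rw [ih]
      constructor
      · rintro (h | ⟨i', hi', rest⟩)
        · rcases (pvInner_le_iff u i best j).mp h with h' | ⟨p, hp, hm, hr⟩
          · exact Or.inl h'
          · exact Or.inr ⟨i, Or.inl rfl, p, hp, hm, hr⟩
        · exact Or.inr ⟨i', Or.inr hi', rest⟩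
      · rintro (h | ⟨i', rfl | hi', rest⟩)
        · exact Or.inl ((pvInner_le_iff u i best j).mpr (Or.inl h))
        · exact Or.inl ((pvInner_le_iff u i' best j).mpr (Or.inr rest))
        · exact Or.inr ⟨i', hi', rest⟩

-- a keyword matches at some position of the scan iff it is a substring (keywords are nonempty)
theorem pvMatch_iff_isIn (u kw : List Char) (hkw : kw ≠ []) :
    (∃ i < u.length, kw = (u.drop i).take kw.length) ↔ PySem.Chars.isIn kw u = true := by
  rw [← PySem.Chars.exists_prefix_drop_iff_isIn]
  constructor
  · rintro ⟨i, _, h⟩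
    exact ⟨i, List.prefix_iff_eq_take.mpr h⟩
  · rintro ⟨i, h⟩
    rcases Nat.lt_or_ge i u.length with hi | hi
    · exact ⟨i, hi, List.prefix_iff_eq_take.mp h⟩
    · exfalso
      rw [List.drop_eq_nil_of_le hi] at h
      exact hkw (List.prefix_nil.mp h)

-- group-j occurrence conditions, phrased on the lowercased character list
theorem pvScan_le_iff' (u : List Char) (j : Nat) :
    (List.range u.length).foldl (fun b i => pvInner u i b) 4 ≤ j ↔
      4 ≤ j ∨ ∃ p ∈ pvKeywords, p.2 ≤ j ∧ PySem.Chars.isIn p.1 u = true := by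
  rw [pvScan_le_iff]
  constructor
  · rintro (h | ⟨i, hi, p, hp, hm, hr⟩)
    · exact Or.inl h
    · refine Or.inr ⟨p, hp, hr, ?_⟩
      refine (pvMatch_iff_isIn u p.1 ?_).mp ⟨i, hi, hm⟩
      fin_cases hp <;> simp
  · rintro (h | ⟨p, hp, hr, hin⟩)
    · exact Or.inl h
    · have hne : p.1 ≠ [] := by fin_cases hp <;> simp
      rcases (pvMatch_iff_isIn u p.1 hne).mpr hin with ⟨i, hi, hm⟩
      exact Or.inr ⟨i, hi, p, hp, hm, hr⟩

-- ===== VERDICT =====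
theorem classify_image_phase_spec : Claim_equal_classify_image_phase := by
  intro url _
  unfold Spec_classify_image_phase classify_image_phase classify_image_phase_alt
  set u := (PySem.Str.lower url).toList with hu
  set best := (List.range u.length).foldl (fun b i => pvInner u i b) 4 with hb
  have key : ∀ j, best ≤ j ↔ 4 ≤ j ∨ ∃ p ∈ pvKeywords, p.2 ≤ j ∧ PySem.Chars.isIn p.1 u = true := by
    intro j; rw [hb, pvScan_le_iff']
  have k0 := key 0
  have k1 := key 1
  have k2 := key 2
  have k3 := key 3
  simp only [pvKeywords, List.mem_cons, List.not_mem_nil, or_false, exists_eq_or_imp,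
    exists_eq_left, PySem.Chars.isIn_iff_infix] at k0 k1 k2 k3
  norm_num at k0 k1 k2 k3
  simp only [List.any_eq_true, List.mem_cons, List.not_mem_nil, or_false, exists_eq_or_imp,
    exists_eq_left, PySem.Str.isIn_iff_infix, ← hu]
  rw [← hb]
  clear_value u best
  clear hb hu key
  by_cases h0 : "free_throw".toList <:+: u ∨ "freethrow".toList <:+: u ∨ "setup".toList <:+: u ∨ "prepare".toList <:+: u
  · rw [if_pos h0, k0.mpr h0]
    simp [pvLabels]
  · by_cases h1 : "aim".toList <:+: u ∨ "target".toList <:+: u ∨ "set_point".toList <:+: u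
    · have hle : best ≤ 1 := k1.mpr (Or.inr (Or.inr (Or.inr (Or.inr h1))))
      have hn : ¬ best = 0 := fun h => h0 (k0.mp h)
      rw [if_neg h0, if_pos h1, show best = 1 by omega]
      simp [pvLabels]
    · by_cases h2 : "release".toList <:+: u ∨ "shoot".toList <:+: u ∨ "shot".toList <:+: u
      · have hle : best ≤ 2 := k2.mpr (Or.inr (Or.inr (Or.inr (Or.inr (Or.inr (Or.inr (Or.inr (h2))))))))
        have hn : ¬ best ≤ 1 := fun h => by
          rcases k1.mp h with h' | h' | h' | h' | h' | h' | h'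
          · exact h0 (Or.inl h')
          · exact h0 (Or.inr (Or.inl h'))
          · exact h0 (Or.inr (Or.inr (Or.inl h')))
          · exact h0 (Or.inr (Or.inr (Or.inr (h'))))
          · exact h1 (Or.inl h')
          · exact h1 (Or.inr (Or.inl h'))
          · exact h1 (Or.inr (Or.inr (h')))
        rw [if_neg h0, if_neg h1, if_pos h2, show best = 2 by omega]
        simp [pvLabels]
      · by_cases h3 : "follow".toList <:+: u ∨ "finish".toList <:+: u ∨ "complete".toList <:+: u
        · have hle : best ≤ 3 := k3.mpr (Or.inr (Or.inr (Or.inr (Or.inr (Or.inr (Or.inr (Or.inr (Or.inr (Or.inr (Or.inr (h3)))))))))))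
          have hn : ¬ best ≤ 2 := fun h => by
            rcases k2.mp h with h' | h' | h' | h' | h' | h' | h' | h' | h' | h'
            · exact h0 (Or.inl h')
            · exact h0 (Or.inr (Or.inl h'))
            · exact h0 (Or.inr (Or.inr (Or.inl h')))
            · exact h0 (Or.inr (Or.inr (Or.inr (h'))))
            · exact h1 (Or.inl h')
            · exact h1 (Or.inr (Or.inl h'))
            · exact h1 (Or.inr (Or.inr (h')))
            · exact h2 (Or.inl h')
            · exact h2 (Or.inr (Or.inl h'))
            · exact h2 (Or.inr (Or.inr (h')))
          rw [if_neg h0, if_neg h1, if_neg h2, if_pos h3, show best = 3 by omega]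
          simp [pvLabels]
        · have hn : ¬ best ≤ 3 := fun h => by
            rcases k3.mp h with h' | h' | h' | h' | h' | h' | h' | h' | h' | h' | h' | h' | h'
            · exact h0 (Or.inl h')
            · exact h0 (Or.inr (Or.inl h'))
            · exact h0 (Or.inr (Or.inr (Or.inl h')))
            · exact h0 (Or.inr (Or.inr (Or.inr (h'))))
            · exact h1 (Or.inl h')
            · exact h1 (Or.inr (Or.inl h'))
            · exact h1 (Or.inr (Or.inr (h')))
            · exact h2 (Or.inl h')
            · exact h2 (Or.inr (Or.inl h'))
            · exact h2 (Or.inr (Or.inr (h')))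
            · exact h3 (Or.inl h')
            · exact h3 (Or.inr (Or.inl h'))
            · exact h3 (Or.inr (Or.inr (h')))
          rw [if_neg h0, if_neg h1, if_neg h2, if_neg h3, if_neg (by omega : ¬ best < 4)]
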